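-- pv_equiv track=rewrite | github.com/magnoazneto/IFPI_Algoritmos | URI/uri_2824_pudim.py | bigger_ordened_string
-- ===== SOURCE A (Python) =====
-- def bigger_ordened_string(smaller, bigger):
--     if len(smaller) > len(bigger):
--         smaller, bigger = bigger, smaller
--     target = ''
--     idx_bigger = 0
--     idx_smaller = 0
--     checkpoint = 0
--     while idx_smaller < len(smaller):
--         while idx_bigger < len(bigger):
--             if smaller[idx_smaller] == bigger[idx_bigger]:
--                 target += smaller[idx_smaller]
--                 idx_bigger += 1
--                 idx_smaller += 1
--                 if idx_smaller > len(smaller)-1: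
--                     break
--                 checkpoint = idx_bigger
--             else:
--                 idx_bigger += 1
--         idx_smaller += 1
--         idx_bigger = checkpoint
--     return len(target)
-- ===== SOURCE B (Python) =====
-- def bigger_ordened_string(smaller, bigger):
--     if len(smaller) > len(bigger):
--         smaller, bigger = bigger, smaller
--     # index: for each char, the stack of its positions in bigger,
--     # smallest position on top (built by scanning bigger backwards)
--     pos = {}
--     for i in range(len(bigger) - 1, -1, -1):
--         pos.setdefault(bigger[i], []).append(i)
--     count = 0
--     p = 0
--     for c in smaller:
--         lst = pos.get(c)
--         if lst is None:
--             continue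
--         while lst and lst[-1] < p:
--             lst.pop()
--         if lst:
--             p = lst.pop() + 1
--             count += 1
--     return count
-- ===== Notes on version B (the rewrite author's own statement) =====
-- stated objective: faster
-- what changed: B replaces A's nested rescanning loops (checkpoint pointer, re-scan of bigger to its end on every unmatchable character) by a one-pass per-character position index of bigger, consumed with a monotone pointer, so the inner scan over bigger disappears.
import Mathlib
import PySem

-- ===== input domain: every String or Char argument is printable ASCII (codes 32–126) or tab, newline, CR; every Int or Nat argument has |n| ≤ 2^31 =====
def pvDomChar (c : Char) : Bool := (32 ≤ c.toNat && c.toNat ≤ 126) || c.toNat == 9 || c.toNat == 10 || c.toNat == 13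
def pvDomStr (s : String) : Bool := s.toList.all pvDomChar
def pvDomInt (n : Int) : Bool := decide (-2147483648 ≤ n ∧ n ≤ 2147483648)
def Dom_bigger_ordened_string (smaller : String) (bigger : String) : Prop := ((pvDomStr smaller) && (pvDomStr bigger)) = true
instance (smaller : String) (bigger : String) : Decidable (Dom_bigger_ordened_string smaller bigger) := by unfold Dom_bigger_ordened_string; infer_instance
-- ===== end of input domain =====

-- B replaces A's nested rescanning loops by a per-character position index of `bigger`
-- built once and consumed with a monotone pointer (objective: faster, asymptotic).

-- ===== PORT A =====
-- A's inner `while idx_bigger < len(bigger)` loop; every string index is guarded in-range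
-- by the loop conditions, so `List.getD` is exact here.
def pvInnerA (sm bg tgt : List Char) (ib is cp : Nat) : List Char × Nat × Nat × Nat :=
  if _h : ib < bg.length then
    if sm.getD is ' ' = bg.getD ib ' ' then
      -- target += smaller[idx_smaller]; idx_bigger += 1; idx_smaller += 1
      if is + 1 > sm.length - 1 then (tgt ++ [sm.getD is ' '], ib + 1, is + 1, cp)  -- break
      else pvInnerA sm bg (tgt ++ [sm.getD is ' ']) (ib + 1) (is + 1) (ib + 1)      -- checkpoint = idx_bigger
    else pvInnerA sm bg tgt (ib + 1) is cp
  else (tgt, ib, is, cp)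
termination_by bg.length - ib
decreasing_by all_goals exact Nat.sub_succ_lt_self _ _ _h

-- idx_smaller never decreases across the inner loop (cited by pvOuterA's decreasing_by)
theorem pvInnerA_is_le (sm bg tgt : List Char) (ib is cp : Nat) :
    is ≤ (pvInnerA sm bg tgt ib is cp).2.2.1 := by
  unfold pvInnerA
  split_ifs with h1 h2 h3
  · simp
  · exact le_trans (Nat.le_succ is) (pvInnerA_is_le sm bg (tgt ++ [sm.getD is ' ']) (ib + 1) (is + 1) (ib + 1))
  · exact pvInnerA_is_le sm bg tgt (ib + 1) is cp
  · simp
termination_by bg.length - ib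
decreasing_by all_goals exact Nat.sub_succ_lt_self _ _ h1

-- A's outer `while idx_smaller < len(smaller)` loop
def pvOuterA (sm bg tgt : List Char) (ib is cp : Nat) : Nat :=
  if _h : is < sm.length then
    let r := pvInnerA sm bg tgt ib is cp
    pvOuterA sm bg r.1 r.2.2.2 (r.2.2.1 + 1) r.2.2.2  -- idx_smaller += 1; idx_bigger = checkpoint
  else tgt.length
termination_by sm.length - is
decreasing_by
  exact Nat.sub_lt_sub_left _h (Nat.lt_succ_of_le (pvInnerA_is_le sm bg tgt ib is cp))

def bigger_ordened_string (smaller : String) (bigger : String) : Int :=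
  if smaller.toList.length > bigger.toList.length then
    Int.ofNat (pvOuterA bigger.toList smaller.toList [] 0 0 0)
  else
    Int.ofNat (pvOuterA smaller.toList bigger.toList [] 0 0 0)

-- ===== PORT B =====
-- `while lst and lst[-1] < p: lst.pop()`: the Python list holds positions in DECREASING
-- order (top of the stack = its last element = the smallest position), so it is modelled
-- by the reversed Lean list (Python's lst[-1]/pop() = Lean head/tail), increasing order.
def pvDropSmall (p : Nat) : List Nat → List Nat
  | [] => []
  | q :: tl => if q < p then pvDropSmall p tl else q :: tl

-- `for i in range(len(bigger)-1, -1, -1): pos.setdefault(bigger[i], []).append(i)`: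
-- foldr over range visits i from high to low; append-at-end = cons on the reversed model.
def pvBuildPos (bg : List Char) : PySem.Dict Char (List Nat) :=
  (List.range bg.length).foldr
    (fun i d => d.insert (bg.getD i ' ') (i :: d.getD (bg.getD i ' ') [])) PySem.Dict.empty

-- `for c in smaller: …` (the popped list is stored back: Python mutates pos[c] in place)
def pvLoopB (d : PySem.Dict Char (List Nat)) (p count : Nat) : List Char → Nat
  | [] => count
  | c :: rest =>
    match d.get? c with
    | none => pvLoopB d p count rest
    | some lst =>
      match pvDropSmall p lst with
      | [] => pvLoopB (d.insert c []) p count rest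
      | q :: tl => pvLoopB (d.insert c tl) (q + 1) (count + 1) rest

def bigger_ordened_string_alt (smaller : String) (bigger : String) : Int :=
  if smaller.toList.length > bigger.toList.length then
    Int.ofNat (pvLoopB (pvBuildPos smaller.toList) 0 0 bigger.toList)
  else
    Int.ofNat (pvLoopB (pvBuildPos bigger.toList) 0 0 smaller.toList)

-- ===== PRECONDITION & SPEC =====
def Spec_bigger_ordened_string (smaller : String) (bigger : String) (out : Int) : Prop := out = bigger_ordened_string_alt smaller bigger
instance (smaller : String) (bigger : String) (out : Int) : Decidable (Spec_bigger_ordened_string smaller bigger out) := by unfold Spec_bigger_ordened_string; infer_instance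

-- ===== CLAIM (what is proved, stated in full; the proofs are below) =====
def Claim_equal_bigger_ordened_string : Prop := ∀ (smaller : String) (bigger : String), Dom_bigger_ordened_string smaller bigger → Spec_bigger_ordened_string smaller bigger (bigger_ordened_string smaller bigger)

-- ===== LEMMAS AND PROOFS =====

-- The common greedy specification: first position q ≥ p of c in bg.
def pvFindFrom (bg : List Char) (c : Char) (p : Nat) : Option Nat :=
  if _h : p < bg.length then
    if bg.getD p ' ' = c then some p else pvFindFrom bg c (p + 1)
  else none
termination_by bg.length - p

def pvCnt (bg : List Char) : List Char → Nat → Nat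
  | [], _ => 0
  | c :: s, p =>
    match pvFindFrom bg c p with
    | some q => 1 + pvCnt bg s (q + 1)
    | none => pvCnt bg s p

theorem pvFindFrom_none (bg : List Char) (c : Char) (p : Nat)
    (h : ∀ j, p ≤ j → j < bg.length → bg.getD j ' ' ≠ c) : pvFindFrom bg c p = none := by
  unfold pvFindFrom
  split_ifs with h1 h2
  · exact absurd h2 (h p le_rfl h1)
  · exact pvFindFrom_none bg c (p + 1) (fun j hj hjl => h j (by omega) hjl)
  · rfl
termination_by bg.length - p

theorem pvFindFrom_some (bg : List Char) (c : Char) (p q : Nat) (hpq : p ≤ q)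
    (hq : q < bg.length) (hc : bg.getD q ' ' = c)
    (hno : ∀ j, p ≤ j → j < q → bg.getD j ' ' ≠ c) : pvFindFrom bg c p = some q := by
  unfold pvFindFrom
  have h1 : p < bg.length := lt_of_le_of_lt hpq hq
  rw [dif_pos h1]
  by_cases h2 : bg.getD p ' ' = c
  · have hpq' : p = q := by
      rcases eq_or_lt_of_le hpq with h | h
      · exact h
      · exact absurd h2 (hno p le_rfl h)
    subst hpq'
    rw [if_pos h2]
  · rw [if_neg h2]
    have hlt : p < q := by
      rcases eq_or_lt_of_le hpq with h | h
      · exact absurd (h ▸ hc) h2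
      · exact h
    exact pvFindFrom_some bg c (p + 1) q (by omega) hq hc (fun j hj hjq => hno j (by omega) hjq)
termination_by bg.length - p

-- ---- side A ----

theorem pvInnerA_spec (sm bg : List Char) (ib : Nat) (tgt : List Char) (is cp : Nat)
    (hs : is < sm.length) (hcp : cp ≤ ib)
    (hno : ∀ j, cp ≤ j → j < ib → bg.getD j ' ' ≠ sm.getD is ' ') :
    (pvInnerA sm bg tgt ib is cp).1.length
      + pvCnt bg (sm.drop ((pvInnerA sm bg tgt ib is cp).2.2.1 + 1)) (pvInnerA sm bg tgt ib is cp).2.2.2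
    = tgt.length + pvCnt bg (sm.drop is) cp := by
  have hdrop : sm.drop is = sm.getD is ' ' :: sm.drop (is + 1) := by
    rw [List.drop_eq_getElem_cons hs, List.getD_eq_getElem sm ' ' hs]
  rw [pvInnerA]
  split_ifs with h1 h2 h3
  · -- match, last char of smaller: is = sm.length - 1
    have hlast : is + 1 = sm.length := by omega
    have hfind : pvFindFrom bg (sm.getD is ' ') cp = some ib :=
      pvFindFrom_some bg _ cp ib hcp h1 h2.symm hno
    have e1 : sm.drop (is + 1 + 1) = [] := List.drop_eq_nil_of_le (by omega)
    have e2 : sm.drop (is + 1) = [] := List.drop_eq_nil_of_le (by omega)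
    simp only [hdrop, pvCnt, hfind, e1, e2, List.length_append, List.length_singleton]
  · -- match, continue the inner loop with the next smaller char
    have hs' : is + 1 < sm.length := by omega
    have ih := pvInnerA_spec sm bg (ib + 1) (tgt ++ [sm.getD is ' ']) (is + 1) (ib + 1)
      hs' le_rfl (fun j hj hj' => absurd (lt_of_le_of_lt hj hj') (lt_irrefl (ib + 1)))
    rw [ih]
    have hfind : pvFindFrom bg (sm.getD is ' ') cp = some ib :=
      pvFindFrom_some bg _ cp ib hcp h1 h2.symm hno
    simp only [hdrop, pvCnt, hfind, List.length_append, List.length_singleton]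
    omega
  · -- mismatch: advance idx_bigger
    have ih := pvInnerA_spec sm bg (ib + 1) tgt is cp hs (by omega)
      (fun j hj hj' => by
        rcases Nat.lt_or_ge j ib with h | h
        · exact hno j hj h
        · have : j = ib := by omega
          subst this
          exact fun hc => h2 hc.symm)
    exact ih
  · -- bigger exhausted: the current smaller char has no occurrence ≥ cp
    have hfind : pvFindFrom bg (sm.getD is ' ') cp = none :=
      pvFindFrom_none bg _ cp (fun j hj hjl => hno j hj (by omega))
    simp only [hdrop, pvCnt, hfind]
termination_by bg.length - ib
decreasing_by all_goals omega

theorem pvOuterA_spec (sm bg : List Char) (is : Nat) (tgt : List Char) (ib : Nat) :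
    pvOuterA sm bg tgt ib is ib = tgt.length + pvCnt bg (sm.drop is) ib := by
  rw [pvOuterA]
  split_ifs with h
  · have hmono := pvInnerA_is_le sm bg tgt ib is ib
    have ih := pvOuterA_spec sm bg ((pvInnerA sm bg tgt ib is ib).2.2.1 + 1)
      (pvInnerA sm bg tgt ib is ib).1 (pvInnerA sm bg tgt ib is ib).2.2.2
    simp only [ih]
    exact pvInnerA_spec sm bg ib tgt is ib h le_rfl
      (fun j hj hj' => absurd (lt_of_le_of_lt hj hj') (lt_irrefl ib))
  · rw [List.drop_eq_nil_of_le (by omega)]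
    simp [pvCnt]
termination_by sm.length - is
decreasing_by
  have := pvInnerA_is_le sm bg tgt ib is ib
  omega

-- ---- side B ----

theorem pvDropSmall_suffix (p : Nat) (l : List Nat) : pvDropSmall p l <:+ l := by
  induction l with
  | nil => exact List.suffix_rfl
  | cons q tl ih =>
    unfold pvDropSmall
    split_ifs with h
    · exact ih.trans (List.suffix_cons q tl)
    · exact List.suffix_rfl

theorem mem_pvDropSmall_of_ge (p j : Nat) (l : List Nat) (hj : j ∈ l) (hpj : p ≤ j) :
    j ∈ pvDropSmall p l := by
  induction l with
  | nil => cases hj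
  | cons q tl ih =>
    unfold pvDropSmall
    split_ifs with h
    · rcases List.mem_cons.mp hj with rfl | hj'
      · omega
      · exact ih hj'
    · exact hj

theorem pvDropSmall_eq_nil (p : Nat) (l : List Nat) (h : ∀ j ∈ l, j < p) :
    pvDropSmall p l = [] := by
  induction l with
  | nil => rfl
  | cons q tl ih =>
    unfold pvDropSmall
    rw [if_pos (h q List.mem_cons_self)]
    exact ih (fun j hj => h j (List.mem_cons_of_mem q hj))

theorem pvDropSmall_head_ge (p q : Nat) (tl l : List Nat) (h : pvDropSmall p l = q :: tl) :
    p ≤ q := by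
  induction l with
  | nil => cases h
  | cons a t ih =>
    unfold pvDropSmall at h
    split_ifs at h with ha
    · exact ih h
    · cases h
      omega

theorem pvDropSmall_shift (p : Nat) (l : List Nat) (h : ∀ e ∈ l, e ≠ p) :
    pvDropSmall p l = pvDropSmall (p + 1) l := by
  induction l with
  | nil => rfl
  | cons a t ih =>
    have ha := h a List.mem_cons_self
    unfold pvDropSmall
    by_cases h1 : a < p
    · rw [if_pos h1, if_pos (by omega)]
      exact ih (fun e he => h e (List.mem_cons_of_mem a he))
    · rw [if_neg h1, if_neg (by omega)]

-- The invariant tying the index dictionary to the text `bg` at pointer `p`.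
def pvInv (bg : List Char) (d : PySem.Dict Char (List Nat)) (p : Nat) : Prop :=
  ∀ c : Char,
    (∀ j ∈ d.getD c [], j < bg.length ∧ bg.getD j ' ' = c) ∧
    (d.getD c []).Pairwise (· < ·) ∧
    (∀ j, p ≤ j → j < bg.length → bg.getD j ' ' = c → j ∈ d.getD c [])

theorem pvFindFrom_eq_head (bg : List Char) (c : Char) (lst : List Nat) (p : Nat)
    (h1 : ∀ j ∈ lst, j < bg.length ∧ bg.getD j ' ' = c)
    (h2 : lst.Pairwise (· < ·))
    (h3 : ∀ j, p ≤ j → j < bg.length → bg.getD j ' ' = c → j ∈ lst) :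
    pvFindFrom bg c p = (pvDropSmall p lst).head? := by
  rw [pvFindFrom]
  split_ifs with hp hc
  · -- bg[p] = c: p is in lst and is the head of the dropped list
    have hpl : p ∈ lst := h3 p le_rfl hp hc
    have hpd : p ∈ pvDropSmall p lst := mem_pvDropSmall_of_ge p p lst hpl le_rfl
    obtain ⟨q, tl, hd⟩ : ∃ q tl, pvDropSmall p lst = q :: tl := by
      cases hds : pvDropSmall p lst with
      | nil => rw [hds] at hpd; cases hpd
      | cons q tl => exact ⟨q, tl, rfl⟩
    have hpw : (pvDropSmall p lst).Pairwise (· < ·) :=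
      h2.sublist (pvDropSmall_suffix p lst).sublist
    rw [hd] at hpd hpw
    have hq : p ≤ q := pvDropSmall_head_ge p q tl lst hd
    have hpq : p = q := by
      rcases List.mem_cons.mp hpd with h | hpd'
      · exact h
      · have := (List.pairwise_cons.mp hpw).1 p hpd'
        omega
    rw [hd, hpq]
    rfl
  · -- bg[p] ≠ c: no element of lst equals p, so dropping by p and by p+1 agree
    have hshift : pvDropSmall p lst = pvDropSmall (p + 1) lst :=
      pvDropSmall_shift p lst (fun e he hep => hc (hep ▸ (h1 e he).2))
    rw [hshift]
    exact pvFindFrom_eq_head bg c lst (p + 1) h1 h2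
      (fun j hj hjl hjc => h3 j (by omega) hjl hjc)
  · -- p past the end: everything in lst is < p
    rw [pvDropSmall_eq_nil p lst (fun j hj => lt_of_lt_of_le (h1 j hj).1 (by omega))]
    rfl
termination_by bg.length - p

theorem pvLoopB_spec (bg : List Char) (s : List Char) :
    ∀ (d : PySem.Dict Char (List Nat)) (p count : Nat), pvInv bg d p →
      pvLoopB d p count s = count + pvCnt bg s p := by
  induction s with
  | nil => intro d p count _; simp [pvLoopB, pvCnt]
  | cons c rest ih =>
    intro d p count hinv
    obtain ⟨h1, h2, h3⟩ := hinv c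
    have hff : pvFindFrom bg c p = (pvDropSmall p (d.getD c [])).head? :=
      pvFindFrom_eq_head bg c (d.getD c []) p h1 h2 h3
    rw [pvLoopB]
    cases hget : d.get? c with
    | none =>
      have hemp : d.getD c [] = [] := PySem.Dict.getD_of_get?_eq_none d [] hget
      rw [hemp] at hff
      rw [pvCnt, hff]
      simp only [pvDropSmall, List.head?_nil]
      exact ih d p count hinv
    | some lst =>
      have hlst : d.getD c [] = lst := PySem.Dict.getD_of_get?_eq_some d [] hget
      rw [hlst] at hff h1 h2 h3
      cases hdrop : pvDropSmall p lst with
      | nil =>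
        rw [hdrop] at hff
        rw [pvCnt, hff]
        simp only [hdrop, List.head?_nil]
        refine ih (d.insert c []) p count ?_
        intro c'
        by_cases hc : c' = c
        · subst hc
          refine ⟨by simp [PySem.Dict.getD_insert_self], by simp [PySem.Dict.getD_insert_self], ?_⟩
          intro j hj hjl hjc
          have : j ∈ pvDropSmall p lst := mem_pvDropSmall_of_ge p j lst (h3 j hj hjl hjc) hj
          rw [hdrop] at this
          cases this
        · obtain ⟨g1, g2, g3⟩ := hinv c'
          rw [PySem.Dict.getD_insert_of_ne _ _ _ hc] at *
          exact ⟨g1, g2, g3⟩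
      | cons q tl =>
        rw [hdrop] at hff
        rw [pvCnt, hff]
        simp only [hdrop, List.head?_cons]
        have hsub : (q :: tl) <:+ lst := hdrop ▸ pvDropSmall_suffix p lst
        have hpwd : (q :: tl).Pairwise (· < ·) := h2.sublist hsub.sublist
        have hq : p ≤ q := pvDropSmall_head_ge p q tl lst hdrop
        have hmem : ∀ j ∈ q :: tl, j ∈ lst := fun j hj => hsub.sublist.mem hj
        have hinv' : pvInv bg (d.insert c tl) (q + 1) := by
          intro c'
          by_cases hc : c' = c
          · subst hc
            rw [PySem.Dict.getD_insert_self]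
            refine ⟨fun j hj => h1 j (hmem j (List.mem_cons_of_mem q hj)),
              (List.pairwise_cons.mp hpwd).2, ?_⟩
            intro j hj hjl hjc
            have hjin : j ∈ pvDropSmall p lst :=
              mem_pvDropSmall_of_ge p j lst (h3 j (by omega) hjl hjc) (by omega)
            rw [hdrop] at hjin
            rcases List.mem_cons.mp hjin with rfl | hjin'
            · omega
            · exact hjin'
          · obtain ⟨g1, g2, g3⟩ := hinv c'
            rw [PySem.Dict.getD_insert_of_ne _ _ _ hc]
            exact ⟨g1, g2, fun j hj hjl hjc => g3 j (by omega) hjl hjc⟩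
        rw [ih (d.insert c tl) (q + 1) (count + 1) hinv']
        omega

theorem pvInv_build (bg : List Char) : pvInv bg (pvBuildPos bg) 0 := by
  have hb : ∀ (l : List Nat) (d : PySem.Dict Char (List Nat)) (c : Char),
      ((l.foldr (fun i d => d.insert (bg.getD i ' ') (i :: d.getD (bg.getD i ' ') [])) d).getD c [])
        = (l.filter (fun i => bg.getD i ' ' = c)) ++ d.getD c [] := by
    intro l
    induction l with
    | nil => intro d c; simp
    | cons i t ih =>
      intro d c
      simp only [List.foldr_cons, List.filter_cons]
      by_cases hc : c = bg.getD i ' '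
      · rw [hc, PySem.Dict.getD_insert_self, ih d (bg.getD i ' ')]
        simp
      · rw [PySem.Dict.getD_insert_of_ne _ _ _ hc, ih d c]
        have hd : (decide (bg.getD i ' ' = c)) = false :=
          decide_eq_false (fun h => hc h.symm)
        rw [hd]
        simp
  have hget : ∀ c, (pvBuildPos bg).getD c [] =
      (List.range bg.length).filter (fun i => bg.getD i ' ' = c) := by
    intro c
    unfold pvBuildPos
    rw [hb]
    simp
  intro c
  rw [hget c]
  refine ⟨?_, ?_, ?_⟩
  · intro j hj
    rw [List.mem_filter, List.mem_range] at hj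
    exact ⟨hj.1, by simpa using hj.2⟩
  · exact (List.pairwise_lt_range).sublist List.filter_sublist
  · intro j _ hjl hjc
    rw [List.mem_filter, List.mem_range]
    exact ⟨hjl, by simpa using hjc⟩

-- ---- combining both sides ----

theorem pvCore (sm bg : List Char) :
    pvOuterA sm bg [] 0 0 0 = pvLoopB (pvBuildPos bg) 0 0 sm := by
  rw [pvOuterA_spec sm bg 0 [] 0, pvLoopB_spec bg sm (pvBuildPos bg) 0 0 (pvInv_build bg)]
  simp

-- ===== VERDICT (by name: the statement is the Claim_ definition above) =====
theorem bigger_ordened_string_spec : Claim_equal_bigger_ordened_string := by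
  intro smaller bigger _
  unfold Spec_bigger_ordened_string bigger_ordened_string bigger_ordened_string_alt
  split_ifs
  · exact congrArg Int.ofNat (pvCore bigger.toList smaller.toList)
  · exact congrArg Int.ofNat (pvCore smaller.toList bigger.toList)
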